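-- pv_equiv track=rewrite | github.com/pypi-data/pypi-mirror-171 | packages/shub-workflow/shub_workflow-1.9.7.2-py3-none-any.whl/shub_workflow/crawl.py | get_jobseq
-- ===== SOURCE A (Python) =====
-- def get_jobseq(tags):
--     jobseq, repetition = 0, 0
--     for tag in tags:
--         if tag.startswith("JOBSEQ="):
--             tag = tag.replace("JOBSEQ=", "")
--             jobseq, *rep = tag.split(".r")
--             rep.append(0)
--             repetition = int(rep[0])
--             jobseq = int(jobseq)
--     return jobseq, repetition
-- ===== SOURCE B (Python) =====
-- def get_jobseq(tags):
--     # Reverse scan with early exit: last matching tag wins; parse once, outside the loop.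
--     found = None
--     for tag in reversed(tags):
--         if tag.startswith("JOBSEQ="):
--             found = tag
--             break
--     if found is None:
--         return 0, 0
--     s = found.replace("JOBSEQ=", "")
--     head, *rest = s.split(".r")
--     return int(head), (int(rest[0]) if rest else 0)
-- ===== Notes on version B (the rewrite author's own statement) =====
-- stated objective: simpler
-- what changed: A parses every JOBSEQ= tag inside the loop, overwriting its state each time; B locates the last matching tag by an early-exit reverse scan and parses that single tag once outside the loop.
import Mathlib
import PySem

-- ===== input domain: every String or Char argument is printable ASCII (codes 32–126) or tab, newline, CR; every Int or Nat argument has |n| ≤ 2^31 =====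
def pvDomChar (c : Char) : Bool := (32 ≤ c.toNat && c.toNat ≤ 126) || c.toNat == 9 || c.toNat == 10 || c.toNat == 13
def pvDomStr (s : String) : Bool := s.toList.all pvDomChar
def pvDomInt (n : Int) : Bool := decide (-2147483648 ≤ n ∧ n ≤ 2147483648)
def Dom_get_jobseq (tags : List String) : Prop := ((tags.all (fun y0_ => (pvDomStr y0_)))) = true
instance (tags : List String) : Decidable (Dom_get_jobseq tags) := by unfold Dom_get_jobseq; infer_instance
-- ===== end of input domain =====

-- B locates the last "JOBSEQ=" tag by an early-exit reverse scan and parses it once outside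
-- the loop, instead of A's parse-every-match loop ('simpler' objective).

-- ===== PORT A =====
-- one body of A's loop; state none = a ValueError was raised (those inputs are excluded by Pre_)
def aStep (st : Option (Int × Int)) (tag : String) : Option (Int × Int) :=
  match st with
  | none => none
  | some (jobseq, repetition) =>
    if PySem.Str.startswith tag "JOBSEQ=" then
      let tag' := PySem.Str.replace tag "JOBSEQ=" ""
      match PySem.Chars.splitOn tag'.toList ".r".toList with
      | [] => none                                  -- unreachable: split is never empty
      | j :: rep =>
        -- rep.append(0); repetition = int(rep[0]); jobseq = int(jobseq)
        match (match rep with | [] => some 0 | r :: _ => PySem.Int.ofChars? r),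
              PySem.Int.ofChars? j with
        | some r, some jv => some (jv, r)
        | _, _ => none
    else some (jobseq, repetition)

def get_jobseq (tags : List String) : Int × Int :=
  (tags.foldl aStep (some (0, 0))).getD (0, 0)

-- ===== PORT B =====
-- early-exit scan over reversed(tags): the first match from the back
def bFind : List String → Option String
  | [] => none
  | t :: ts => if PySem.Str.startswith t "JOBSEQ=" then some t else bFind ts

-- parse the single found tag (the (0,0) fallback arms are unreachable under Pre_)
def bParse (t : String) : Int × Int :=
  let s := PySem.Str.replace t "JOBSEQ=" ""
  match PySem.Chars.splitOn s.toList ".r".toList with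
  | [] => (0, 0)
  | h :: rest =>
    match PySem.Int.ofChars? h, (match rest with | [] => some 0 | r :: _ => PySem.Int.ofChars? r) with
    | some j, some r => (j, r)
    | _, _ => (0, 0)

def get_jobseq_alt (tags : List String) : Int × Int :=
  match bFind tags.reverse with
  | none => (0, 0)
  | some t => bParse t

-- ===== PRECONDITION & SPEC =====
-- a matching tag parses cleanly: int() succeeds on the head and (if present) on the first '.r' part
def tagOk (t : String) : Bool :=
  !(PySem.Str.startswith t "JOBSEQ=") ||
    ((PySem.Int.ofChars? ((PySem.Chars.splitOn (PySem.Str.replace t "JOBSEQ=" "").toList ".r".toList).headD [])).isSome &&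
     ((PySem.Chars.splitOn (PySem.Str.replace t "JOBSEQ=" "").toList ".r".toList).tail.isEmpty ||
      (PySem.Int.ofChars? (((PySem.Chars.splitOn (PySem.Str.replace t "JOBSEQ=" "").toList ".r".toList).tail).headD [])).isSome))

-- Pre_ excludes exactly the inputs where A raises ValueError: some "JOBSEQ=" tag whose
-- jobseq or repetition field is not int()-parsable.
def Pre_get_jobseq (tags : List String) : Prop := ∀ t ∈ tags, tagOk t = true

instance (tags : List String) : Decidable (Pre_get_jobseq tags) := by unfold Pre_get_jobseq; infer_instance

def pvWitness_get_jobseq : List String := ["foo", "JOBSEQ=12.r3", "JOBSEQ=7"]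

def Spec_get_jobseq (tags : List String) (out : Int × Int) : Prop := out = get_jobseq_alt tags
instance (tags : List String) (out : Int × Int) : Decidable (Spec_get_jobseq tags out) := by unfold Spec_get_jobseq; infer_instance

-- ===== CLAIM (what is proved, stated in full; the proofs are below) =====
def Claim_equal_get_jobseq : Prop := ∀ (tags : List String), Dom_get_jobseq tags → Pre_get_jobseq tags → Spec_get_jobseq tags (get_jobseq tags)

-- ===== LEMMAS AND PROOFS =====

-- a parse-ok matching tag: one step of A's loop rewrites any state to B's parse of that tag
theorem aStep_match (s : Int × Int) (t : String) (hok : tagOk t = true)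
    (hm : PySem.Str.startswith t "JOBSEQ=" = true) :
    aStep (some s) t = some (bParse t) := by
  unfold tagOk at hok
  rw [hm] at hok
  simp only [Bool.not_true, Bool.false_or, Bool.and_eq_true] at hok
  obtain ⟨h1, h2⟩ := hok
  obtain ⟨s1, s2⟩ := s
  simp only [aStep, bParse]
  rw [hm]
  simp only [if_true]
  cases hsp : PySem.Chars.splitOn (PySem.Str.replace t "JOBSEQ=" "").toList ".r".toList with
  | nil => rw [hsp] at h1; exact absurd h1 (by decide)
  | cons j rep =>
    rw [hsp] at h1 h2
    simp only [List.headD_cons] at h1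
    cases hj : PySem.Int.ofChars? j with
    | none => rw [hj] at h1; simp at h1
    | some jv =>
      cases rep with
      | nil => simp [hj]
      | cons r rest =>
        simp only [List.tail_cons, Bool.or_eq_true, List.isEmpty_cons] at h2
        rcases h2 with h2 | h2
        · cases h2
        · simp only [List.headD_cons] at h2
          cases hr : PySem.Int.ofChars? r with
          | none => rw [hr] at h2; simp at h2
          | some rv => simp [hj, hr]

theorem aStep_nomatch (s : Int × Int) (t : String)
    (hm : PySem.Str.startswith t "JOBSEQ=" = false) :
    aStep (some s) t = some s := by
  obtain ⟨s1, s2⟩ := s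
  simp only [aStep]
  rw [hm]
  simp

-- B's reverse scan, peeled from the back
theorem bFind_append (xs : List String) (u : String) :
    bFind (xs ++ [u]) = match bFind xs with
      | none => if PySem.Str.startswith u "JOBSEQ=" then some u else none
      | some v => some v := by
  induction xs with
  | nil => rfl
  | cons x xs ihx =>
    cases hx : PySem.Str.startswith x "JOBSEQ=" with
    | true =>
      simp only [List.cons_append, bFind]
      rw [hx]
      simp
    | false =>
      simp only [List.cons_append, bFind]
      rw [hx]
      simp only [Bool.false_eq_true, if_false, ihx]

-- main invariant: under Pre_, A's fold from any state equals B's reverse-find-then-parse,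
-- falling back on the incoming state when no tag matches
theorem fold_eq (tags : List String) (hpre : ∀ t ∈ tags, tagOk t = true) (s : Int × Int) :
    tags.foldl aStep (some s) =
      some (match bFind tags.reverse with
            | none => s
            | some t => bParse t) := by
  induction tags generalizing s with
  | nil => simp [bFind]
  | cons t ts ih =>
    have hts : ∀ u ∈ ts, tagOk u = true := fun u hu => hpre u (List.mem_cons_of_mem _ hu)
    cases hm : PySem.Str.startswith t "JOBSEQ=" with
    | false =>
      simp only [List.foldl_cons, aStep_nomatch s t hm, ih hts, List.reverse_cons, bFind_append]
      rw [hm]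
      cases bFind ts.reverse <;> simp
    | true =>
      simp only [List.foldl_cons, aStep_match s t (hpre t List.mem_cons_self) hm,
        ih hts, List.reverse_cons, bFind_append]
      rw [hm]
      cases bFind ts.reverse <;> simp

-- ===== VERDICT (by name: the statement is the Claim_ definition above) =====
theorem get_jobseq_spec : Claim_equal_get_jobseq := by
  intro tags _ hpre
  unfold Spec_get_jobseq get_jobseq get_jobseq_alt
  rw [fold_eq tags hpre (0, 0)]
  cases bFind tags.reverse <;> simp
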